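-- pv_equiv track=rewrite | github.com/TrueMiller/Edimo | edimo/edimo.py | _remove_options
-- ===== SOURCE A (Python) =====
-- def _remove_options(options, default="-,--"):
--     #Should use dictionary instead of set.
--     #Since the user-value could be none or something, we have
--     #to obtain the entire value so that we can call remove obj
--     #from the set.
--     #We must wait till we are done using the set to remove obj.
--
--     opts_to_rm = default.split(",")
--     pending_removal = []
--     for op in options:
--         if op[0] in opts_to_rm:
--             pending_removal.append(op)
--     for op in pending_removal:
--         options.remove(op)
--     return options
-- ===== SOURCE B (Python) =====
-- def _remove_options(options, default="-,--"):
--     markers = set(default.split(","))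
--     kept = []
--     for op in reversed(options):
--         if op[0] not in markers:
--             kept.append(op)
--     kept.reverse()
--     options[:] = kept
--     return options
-- ===== Notes on version B (the rewrite author's own statement) =====
-- stated objective: alternative
-- what changed: Replaces A's two-phase collect-then-repeatedly-remove (list.remove rescans the list for each flagged element) with a marker set plus a single reversed-iteration accumulator that rebuilds the kept list and assigns it in place.
-- outside the precondition, e.g. on _remove_options([''], '-,--'): A raises IndexError, B raises IndexError
import Mathlib
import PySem

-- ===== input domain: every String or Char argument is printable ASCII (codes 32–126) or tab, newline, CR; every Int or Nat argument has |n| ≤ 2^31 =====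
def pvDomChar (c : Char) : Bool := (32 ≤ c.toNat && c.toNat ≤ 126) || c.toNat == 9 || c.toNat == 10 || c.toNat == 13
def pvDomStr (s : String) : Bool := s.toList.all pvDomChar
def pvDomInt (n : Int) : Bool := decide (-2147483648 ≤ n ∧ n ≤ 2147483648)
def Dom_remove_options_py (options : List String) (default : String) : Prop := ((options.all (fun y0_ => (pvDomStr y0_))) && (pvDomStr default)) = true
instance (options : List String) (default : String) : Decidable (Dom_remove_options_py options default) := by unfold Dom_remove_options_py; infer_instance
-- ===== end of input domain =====

-- B replaces A's collect-then-repeatedly-remove with a marker set and a single back-to-front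
-- structural recursion (alternative); both mutate the caller's list the same way in Python,
-- equivalence here is about the return value.

-- ===== PORT A =====
-- literal port: collect flagged options into pending_removal, then list.remove each from options
def remove_options_py (options : List String) (default : String) : List String :=
  let opts_to_rm := (PySem.Str.split? default ",").getD []
  let pending_removal := options.foldl
    (fun acc op =>
      if (match op.toList with
          | c :: _ => List.contains opts_to_rm (String.ofList [c])
          | [] => false)                     -- op[0] on "" raises IndexError; excluded by Pre_
      then acc ++ [op] else acc) []
  pending_removal.foldl (fun acc op => (PySem.List.remove? acc op).getD acc) options

-- ===== PORT B =====
-- literal port of B: markers as a set; iterate over reversed(options) appending the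
-- survivors, then reverse the accumulator back.  op[0] is ported as the one-character
-- string of op's first code point (op[0] on "" raises IndexError; excluded by Pre_).
def remove_options_py_alt (options : List String) (default : String) : List String :=
  let markers : PySem.Set String := PySem.Set.ofList ((PySem.Str.split? default ",").getD [])
  let kept := options.reverse.foldl
    (fun acc op =>
      if !(PySem.Set.contains markers (String.ofList (op.toList.take 1)))
      then acc ++ [op] else acc) []
  kept.reverse

-- ===== PRECONDITION & SPEC =====
-- Pre_ excludes lists containing the empty string, on which Python A (and B) raise IndexError at op[0].
def Pre_remove_options_py (options : List String) (default : String) : Prop := "" ∉ options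
instance (options : List String) (default : String) : Decidable (Pre_remove_options_py options default) := by unfold Pre_remove_options_py; infer_instance
def pvWitness_remove_options_py : List String × String := (["-x", "ab", "--y"], "-,--")

def Spec_remove_options_py (options : List String) (default : String) (out : List String) : Prop := out = remove_options_py_alt options default
instance (options : List String) (default : String) (out : List String) : Decidable (Spec_remove_options_py options default out) := by unfold Spec_remove_options_py; infer_instance

-- ===== CLAIM (what is proved, stated in full; the proofs are below) =====
def Claim_equal_remove_options_py : Prop := ∀ (options : List String) (default : String), Dom_remove_options_py options default → Pre_remove_options_py options default → Spec_remove_options_py options default (remove_options_py options default)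

-- ===== LEMMAS AND PROOFS =====

-- removing elements all different from the head commutes with consing the head
theorem pv_foldl_remove_cons (x : String) (t : List String) (xs : List String)
    (h : ∀ e ∈ xs, e ≠ x) :
    xs.foldl (fun acc op => (PySem.List.remove? acc op).getD acc) (x :: t)
      = x :: xs.foldl (fun acc op => (PySem.List.remove? acc op).getD acc) t := by
  induction xs generalizing t with
  | nil => rfl
  | cons e es ih =>
    have hne : x ≠ e := fun hx => (h e (List.mem_cons_self)) hx.symm
    simp only [List.foldl_cons]
    rw [PySem.List.remove?_cons_of_ne t hne]
    cases PySem.List.remove? t e with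
    | none => simp [ih _ (fun a ha => h a (List.mem_cons_of_mem _ ha))]
    | some r => simp [ih _ (fun a ha => h a (List.mem_cons_of_mem _ ha))]

-- removing, in order, every element of (l.filter p) from l leaves exactly l.filter (¬ p)
theorem pv_remove_filter (p : String → Bool) (l : List String) :
    (l.filter p).foldl (fun acc op => (PySem.List.remove? acc op).getD acc) l
      = l.filter (fun op => !(p op)) := by
  induction l with
  | nil => rfl
  | cons h t ih =>
    by_cases hp : p h = true
    · simp only [List.filter_cons, hp, if_pos, List.foldl_cons]
      rw [PySem.List.remove?_cons_self]
      simpa [hp] using ih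
    · have hp' : p h = false := by simpa using hp
      have hall : ∀ e ∈ t.filter p, e ≠ h := by
        intro e he hc
        have := (List.mem_filter.mp he).2
        rw [hc, hp'] at this; exact absurd this (by simp)
      simp only [List.filter_cons, hp', if_neg, Bool.false_eq_true, not_false_iff,
        pv_foldl_remove_cons h t _ hall, ih]
      simp

-- ===== VERDICT (by name: the statement is the Claim_ definition above) =====
theorem remove_options_py_spec : Claim_equal_remove_options_py := by
  intro options default _ hpre
  unfold Spec_remove_options_py remove_options_py remove_options_py_alt
  simp only [PySem.List.foldl_append_if_eq_filter, List.nil_append]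
  rw [pv_remove_filter]
  simp only [List.filter_reverse, List.reverse_reverse]
  apply List.filter_congr
  intro op hop
  have hne : op ≠ "" := fun h => hpre (h ▸ hop)
  cases hc : op.toList with
  | nil => exact absurd (by rw [← String.ofList_toList (s := op), hc]) hne
  | cons c cs =>
    simp [PySem.Set.contains, PySem.Set.mem_ofList]
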